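-- pv_equiv track=rewrite | github.com/Mridul1129261/Caesar-Cipher-Coder | main.py | pasword
-- ===== SOURCE A (Python) =====
-- def pasword(n, pas, drop):
--   a=[]
--   for i in pas:
--     if ord(i) not in range(48,58) and n==0:
--       a.append(chr(ord(i)+drop))
--     elif ord(i) not in range(48,58) and n==1:
--       a.append(chr(ord(i)-drop))
--   return(''.join(a))
-- ===== SOURCE B (Python) =====
-- def pasword(n, pas, drop):
--     if n == 0:
--         d = drop
--     elif n == 1:
--         d = -drop
--     else:
--         return ''
--     table = {ord(c): (None if 48 <= ord(c) < 58 else ord(c) + d) for c in pas}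
--     return pas.translate(table)
-- ===== Notes on version B (the rewrite author's own statement) =====
-- stated objective: idiomatic
-- what changed: Replaces the per-character if/elif append loop with an early return for n outside {0,1}, a precomputed codepoint translation table (digits map to None) and a single str.translate pass.
import Mathlib
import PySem

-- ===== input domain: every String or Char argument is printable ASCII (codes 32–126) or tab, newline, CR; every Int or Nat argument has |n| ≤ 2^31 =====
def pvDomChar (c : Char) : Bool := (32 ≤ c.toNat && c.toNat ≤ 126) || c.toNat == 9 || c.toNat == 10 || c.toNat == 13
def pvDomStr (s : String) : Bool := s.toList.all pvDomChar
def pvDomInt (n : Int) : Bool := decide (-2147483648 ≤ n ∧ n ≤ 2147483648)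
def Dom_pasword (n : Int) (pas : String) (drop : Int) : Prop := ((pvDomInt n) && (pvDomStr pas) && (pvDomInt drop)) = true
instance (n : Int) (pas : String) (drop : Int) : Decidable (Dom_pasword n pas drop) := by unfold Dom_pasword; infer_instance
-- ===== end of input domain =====

-- B replaces A's per-character if/elif append loop by an early return for n ∉ {0,1}, a precomputed
-- codepoint→(Option codepoint) translation table (digits ↦ none) and one table-driven translate pass (idiomatic).

-- ===== PORT A =====
-- chr(v): exact where Pre_ holds (0 ≤ v ≤ 0x10FFFF, not a surrogate); Char.ofNat is total in Lean.
def pvChr (v : Int) : Char := Char.ofNat v.toNat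

def pasword (n : Int) (pas : String) (drop : Int) : String :=
  let a : List Char := pas.toList.foldl (fun a i =>
    if ¬(48 ≤ (i.toNat : Int) ∧ (i.toNat : Int) < 58) ∧ n = 0 then a ++ [pvChr ((i.toNat : Int) + drop)]
    else if ¬(48 ≤ (i.toNat : Int) ∧ (i.toNat : Int) < 58) ∧ n = 1 then a ++ [pvChr ((i.toNat : Int) - drop)]
    else a) []
  String.mk a

-- ===== PORT B =====
def pasword_alt (n : Int) (pas : String) (drop : Int) : String :=
  if n = 0 ∨ n = 1 then
    let d : Int := if n = 0 then drop else -drop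
    let table : PySem.Dict Int (Option Int) :=
      pas.toList.foldl (fun t c =>
        t.insert (c.toNat : Int)
          (if 48 ≤ (c.toNat : Int) ∧ (c.toNat : Int) < 58 then none else some ((c.toNat : Int) + d)))
        PySem.Dict.empty
    -- str.translate: each char looked up by codepoint; none deletes, some v becomes chr(v)
    String.mk (pas.toList.filterMap (fun c =>
      (table.getD (c.toNat : Int) (some (c.toNat : Int))).map pvChr))
  else ""

-- ===== PRECONDITION & SPEC =====
def pvOkCode (v : Int) : Bool :=
  decide (0 ≤ v ∧ v ≤ 1114111 ∧ ¬(55296 ≤ v ∧ v ≤ 57343))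

-- Pre_ excludes the inputs where Python's chr/translate raises (shifted codepoint outside 0..0x10FFFF),
-- and also the shifts landing in the surrogate range 0xD800–0xDFFF, where A returns a lone-surrogate
-- string that a Lean String (Unicode scalar values) cannot represent; B returns the same string there.
def Pre_pasword (n : Int) (pas : String) (drop : Int) : Prop :=
  pas.toList.all (fun c =>
    (48 ≤ c.toNat && c.toNat < 58) ||
    ((!(n == 0) || pvOkCode ((c.toNat : Int) + drop)) &&
     (!(n == 1) || pvOkCode ((c.toNat : Int) - drop)))) = true

instance (n : Int) (pas : String) (drop : Int) : Decidable (Pre_pasword n pas drop) := by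
  unfold Pre_pasword; infer_instance

def pvWitness_pasword : Int × String × Int := (0, "abc 12!", 3)

def Spec_pasword (n : Int) (pas : String) (drop : Int) (out : String) : Prop := out = pasword_alt n pas drop
instance (n : Int) (pas : String) (drop : Int) (out : String) : Decidable (Spec_pasword n pas drop out) := by unfold Spec_pasword; infer_instance

-- ===== CLAIM (what is proved, stated in full; the proofs are below) =====
def Claim_equal_pasword : Prop := ∀ (n : Int) (pas : String) (drop : Int), Dom_pasword n pas drop → Pre_pasword n pas drop → Spec_pasword n pas drop (pasword n pas drop)

-- ===== LEMMAS AND PROOFS =====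

-- the per-character emission shared by both sides once n is fixed to 0 or 1
def pvEmit (d : Int) (c : Char) : Option Char :=
  if 48 ≤ (c.toNat : Int) ∧ (c.toNat : Int) < 58 then none else some (pvChr ((c.toNat : Int) + d))

-- A's loop, with n = 0 or n = 1, is filterMap of pvEmit
theorem foldA_eq_filterMap (d : Int) :
    ∀ (l : List Char) (acc : List Char),
      l.foldl (fun a i => if ¬(48 ≤ (i.toNat : Int) ∧ (i.toNat : Int) < 58) then a ++ [pvChr ((i.toNat : Int) + d)] else a) acc
        = acc ++ l.filterMap (pvEmit d) := by
  intro l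
  induction l with
  | nil => intro acc; simp
  | cons x xs ih =>
    intro acc
    simp only [List.foldl_cons, List.filterMap_cons, pvEmit]
    by_cases h : 48 ≤ (x.toNat : Int) ∧ (x.toNat : Int) < 58
    · rw [if_neg (by simpa using h), if_pos h]; exact ih acc
    · rw [if_pos (by simpa using h), if_neg h, ih, List.append_assoc]; rfl

-- a value-determined-by-key insert loop: lookups in the result give the key's value, preserved
theorem table_preserve (f : Int → Option Int) :
    ∀ (l : List Char) (t : PySem.Dict Int (Option Int)) (k : Int) (dflt : Option Int),
      t.getD k dflt = f k →
      (l.foldl (fun t c => t.insert (c.toNat : Int) (f (c.toNat : Int))) t).getD k dflt = f k := by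
  intro l
  induction l with
  | nil => intro t k dflt h; simpa using h
  | cons x xs ih =>
    intro t k dflt h
    simp only [List.foldl_cons]
    apply ih
    rw [PySem.Dict.getD_insert]
    split_ifs with hk
    · rw [hk]
    · exact h

theorem table_getD (f : Int → Option Int) :
    ∀ (l : List Char) (t : PySem.Dict Int (Option Int)) (c : Char) (dflt : Option Int),
      c ∈ l →
      (l.foldl (fun t c => t.insert (c.toNat : Int) (f (c.toNat : Int))) t).getD (c.toNat : Int) dflt
        = f (c.toNat : Int) := by
  intro l
  induction l with
  | nil => intro _ _ _ h; cases h
  | cons x xs ih =>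
    intro t c dflt hmem
    simp only [List.foldl_cons]
    rcases List.mem_cons.mp hmem with h | h
    · subst h
      exact table_preserve f xs _ _ _ (by rw [PySem.Dict.getD_insert_self])
    · exact ih _ _ _ h

-- ===== VERDICT (by name: the statement is the Claim_ definition above) =====
theorem pvList_eq (d : Int) (l : List Char) :
    l.filterMap (fun c =>
      ((l.foldl (fun t c =>
          t.insert (c.toNat : Int)
            (if 48 ≤ (c.toNat : Int) ∧ (c.toNat : Int) < 58 then none else some ((c.toNat : Int) + d)))
          PySem.Dict.empty).getD (c.toNat : Int) (some (c.toNat : Int))).map pvChr)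
    = l.filterMap (pvEmit d) := by
  apply List.filterMap_congr
  intro c hc
  rw [table_getD (fun k => if 48 ≤ k ∧ k < 58 then none else some (k + d)) l PySem.Dict.empty c _ hc]
  unfold pvEmit
  by_cases h : 48 ≤ (c.toNat : Int) ∧ (c.toNat : Int) < 58
  · rw [if_pos h, if_pos h]; rfl
  · rw [if_neg h, if_neg h]; rfl

theorem pasword_spec : Claim_equal_pasword := by
  intro n pas drop _ _
  unfold Spec_pasword pasword pasword_alt
  by_cases h0 : n = 0
  · subst h0
    simp only [show ((0:Int) = 1) = False from by simp,
               if_true, and_true, and_false, if_false]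
    rw [pvList_eq drop pas.toList, foldA_eq_filterMap drop pas.toList [], List.nil_append]
    simp
  · by_cases h1 : n = 1
    · subst h1
      simp only [show ((1:Int) = 0) = False from by norm_num,
                 and_true, and_false, if_false, sub_eq_add_neg]
      rw [pvList_eq (-drop) pas.toList, foldA_eq_filterMap (-drop) pas.toList [], List.nil_append]
      simp
    · rw [if_neg (by tauto : ¬(n = 0 ∨ n = 1))]
      have hz : pas.toList.foldl (fun a i =>
          if ¬(48 ≤ (i.toNat : Int) ∧ (i.toNat : Int) < 58) ∧ n = 0 then a ++ [pvChr ((i.toNat : Int) + drop)]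
          else if ¬(48 ≤ (i.toNat : Int) ∧ (i.toNat : Int) < 58) ∧ n = 1 then a ++ [pvChr ((i.toNat : Int) - drop)]
          else a) [] = [] := by
        apply List.foldl_fixed'
        intro i
        rw [if_neg (by tauto), if_neg (by tauto)]
      simp only [hz]
      rfl
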